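-- pv_equiv track=rewrite | github.com/yeetari/vull | tools/gen_vk.py | evaluate_depends
-- ===== SOURCE A (Python) =====
-- import operator
--
-- def evaluate_depends(attribute, contains_set):
--     token = ''
--     tokens = []
--     for char in attribute:
--         if char not in '+,()':
--             token += char
--         else:
--             if token:
--                 tokens.append(token)
--             tokens.append(char)
--             token = ''
--     if token:
--         tokens.append(token)
--
--     operator_stack = []
--     rpn = []
--     for token in tokens:
--         if token not in '+,()':
--             rpn.append(token)
--         elif token in '+,':
--             while operator_stack and operator_stack[-1] in '+,':
--                 rpn.append(operator_stack.pop())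
--             operator_stack.append(token)
--         elif token == '(':
--             operator_stack.append('(')
--         elif token == ')':
--             while operator_stack[-1] != '(':
--                 rpn.append(operator_stack.pop())
--             operator_stack.pop()
--     while operator_stack:
--         rpn.append(operator_stack.pop())
--
--     stack = []
--     for atom in rpn:
--         if atom not in '+,':
--             stack.append(atom in contains_set)
--         else:
--             op_fns = {'+': operator.and_, ',': operator.or_}
--             rhs = stack.pop()
--             lhs = stack.pop()
--             stack.append(op_fns[atom](lhs, rhs))
--
--     assert len(stack) == 1
--     return stack.pop()
-- ===== SOURCE B (Python) =====
-- def evaluate_depends(attribute, contains_set):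
--     token = ''
--     tokens = []
--     for char in attribute:
--         if char not in '+,()':
--             token += char
--         else:
--             if token:
--                 tokens.append(token)
--             tokens.append(char)
--             token = ''
--     if token:
--         tokens.append(token)
--
--     # single left-to-right pass: evaluate directly, saving (value, pending op)
--     # on a context stack at each '(' (no RPN, no operator reordering)
--     def absorb(cur, pend, v):
--         if pend is None:
--             return v
--         return (cur and v) if pend == '+' else (cur or v)
--
--     ctx = []     # saved (cur, pend) for each open '('
--     cur = None   # value of the current level so far (None = nothing yet)
--     pend = None  # operator waiting for its right operand
--     for t in tokens:
--         if t == '+' or t == ',':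
--             if cur is None or pend is not None:
--                 raise ValueError('dangling operator')
--             pend = t
--         elif t == '(':
--             if cur is not None and pend is None:
--                 raise ValueError('missing operator before (')
--             ctx.append((cur, pend))
--             cur, pend = None, None
--         elif t == ')':
--             if cur is None or pend is not None or not ctx:
--                 raise ValueError('unbalanced )')
--             v = cur
--             cur, pend = ctx.pop()
--             cur, pend = absorb(cur, pend, v), None
--         else:
--             if cur is not None and pend is None:
--                 raise ValueError('missing operator')
--             cur, pend = absorb(cur, pend, t in contains_set), None
--     if cur is None or pend is not None or ctx:
--         raise ValueError('incomplete expression')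
--     return cur
-- ===== Notes on version B (the rewrite author's own statement) =====
-- stated objective: alternative
-- what changed: Same character tokenizer, but the shunting-yard pass that builds an RPN list plus the separate RPN-evaluation pass are replaced by a single left-to-right pass that evaluates the expression directly, saving (value-so-far, pending operator) on a context stack at each '('.
-- outside the precondition, e.g. on evaluate_depends('(', {'('}): A returns True, B raises ValueError; on evaluate_depends('a()', {'a'}): A returns True, B raises ValueError
import Mathlib
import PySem

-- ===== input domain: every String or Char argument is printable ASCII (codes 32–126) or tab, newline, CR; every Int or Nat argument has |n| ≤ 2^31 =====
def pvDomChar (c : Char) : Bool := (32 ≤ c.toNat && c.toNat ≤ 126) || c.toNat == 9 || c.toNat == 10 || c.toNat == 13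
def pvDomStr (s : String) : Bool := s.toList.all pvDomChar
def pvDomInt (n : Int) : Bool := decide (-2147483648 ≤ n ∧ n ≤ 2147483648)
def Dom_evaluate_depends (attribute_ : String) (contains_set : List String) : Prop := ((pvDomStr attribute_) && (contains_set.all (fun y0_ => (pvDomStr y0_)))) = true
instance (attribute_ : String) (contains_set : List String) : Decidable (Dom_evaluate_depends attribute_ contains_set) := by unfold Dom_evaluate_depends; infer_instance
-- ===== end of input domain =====

-- B replaces A's shunting-yard + RPN evaluation by a single direct-evaluation pass with a
-- context stack ("alternative": same cost, no intermediate RPN list); Pre_ admits exactly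
-- well-formed dependency expressions — on malformed ones A raises or (for leftover '(' /
-- empty '()' inputs) returns an accidental value, while B raises.


-- ===== PORT A =====
-- A-side tokenizer (the character loop of A)
def pvSpecialChar (c : Char) : Bool := c = '+' || c = ',' || c = '(' || c = ')'

def pvTokStep (st : List String × String) (c : Char) : List String × String :=
  if pvSpecialChar c then
    ((st.1 ++ (if st.2 = "" then [] else [st.2])) ++ [String.singleton c], "")
  else (st.1, st.2.push c)

def pvTokenize (s : String) : List String :=
  let st := s.toList.foldl pvTokStep ([], "")
  st.1 ++ (if st.2 = "" then [] else [st.2])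

-- token classifiers: tokens are either a single special char or a nonempty run of
-- non-special chars, so Python's substring tests `t in '+,()'` / `t in '+,'` are
-- exactly these equality disjunctions on the tokens that actually occur
def pvIsSpecial (t : String) : Bool := t = "+" || t = "," || t = "(" || t = ")"
def pvIsOp (t : String) : Bool := t = "+" || t = ","

-- `while operator_stack and operator_stack[-1] in '+,': rpn.append(pop())`
-- operator stack is kept top-at-head; returns (popped in pop order, remaining stack)
def pvPopOps : List String → List String × List String
  | [] => ([], [])
  | o :: os => if pvIsOp o then ((o :: (pvPopOps os).1), (pvPopOps os).2) else ([], o :: os)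

-- `while operator_stack[-1] != '(': rpn.append(pop())` then `pop()` the '(';
-- Python raises IndexError when the stack empties first — that input is outside Pre_
def pvPopParen : List String → List String × List String
  | [] => ([], [])
  | o :: os => if o = "(" then ([], os) else ((o :: (pvPopParen os).1), (pvPopParen os).2)

def pvShuntStep (st : List String × List String) (t : String) : List String × List String :=
  if ¬ pvIsSpecial t then (st.1, st.2 ++ [t])
  else if pvIsOp t then (t :: (pvPopOps st.1).2, st.2 ++ (pvPopOps st.1).1)
  else if t = "(" then ("(" :: st.1, st.2)
  else ((pvPopParen st.1).2, st.2 ++ (pvPopParen st.1).1)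

def pvEvalStep (S : List String) (st : List Bool) (t : String) : List Bool :=
  if ¬ pvIsOp t then decide (t ∈ S) :: st
  else match st with
    | rhs :: lhs :: rest => (if t = "+" then lhs && rhs else lhs || rhs) :: rest
    | _ => []  -- Python raises IndexError (pop from a short stack); outside Pre_

-- `assert len(stack) == 1; return stack.pop()` (AssertionError outside Pre_)
def pvFinishA : List Bool → Bool
  | [v] => v
  | _ => false

def evaluate_depends (attribute_ : String) (contains_set : List String) : Bool :=
  let tokens := pvTokenize attribute_
  let st := tokens.foldl pvShuntStep ([], [])
  let rpn := st.2 ++ st.1   -- final `while operator_stack:` flush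
  pvFinishA (rpn.foldl (pvEvalStep contains_set) [])

-- ===== PORT B =====
-- B-side tokenizer: B's Python contains the identical character loop
def pvSpecialCharB (c : Char) : Bool := c = '+' || c = ',' || c = '(' || c = ')'

def pvTokStepB (st : List String × String) (c : Char) : List String × String :=
  if pvSpecialCharB c then
    ((st.1 ++ (if st.2 = "" then [] else [st.2])) ++ [String.singleton c], "")
  else (st.1, st.2.push c)

def pvTokenizeB (s : String) : List String :=
  let st := s.toList.foldl pvTokStepB ([], "")
  st.1 ++ (if st.2 = "" then [] else [st.2])

def pvIsOpB (t : String) : Bool := t = "+" || t = ","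

def pvAbsorb (cur : Option Bool) (pend : Option String) (v : Bool) : Bool :=
  match pend with
  | none => v
  | some op => if op = "+" then cur.getD false && v else cur.getD false || v

-- state: none = a ValueError was raised; some (ctx, cur, pend) otherwise
def pvBStep (S : List String)
    (st : Option (List (Option Bool × Option String) × Option Bool × Option String))
    (t : String) :
    Option (List (Option Bool × Option String) × Option Bool × Option String) :=
  match st with
  | none => none
  | some (ctx, cur, pend) =>
    if pvIsOpB t then
      if cur.isNone || pend.isSome then none else some (ctx, cur, some t)
    else if t = "(" then
      if cur.isSome && pend.isNone then none else some ((cur, pend) :: ctx, none, none)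
    else if t = ")" then
      if cur.isNone || pend.isSome then none
      else match ctx with
        | [] => none
        | (c0, p0) :: rest => some (rest, some (pvAbsorb c0 p0 (cur.getD false)), none)
    else
      if cur.isSome && pend.isNone then none
      else some (ctx, some (pvAbsorb cur pend (decide (t ∈ S))), none)

-- final `if cur is None or pend is not None or ctx: raise`; `return cur`
def pvFinishB : Option (List (Option Bool × Option String) × Option Bool × Option String) → Bool
  | some ([], some v, none) => v
  | _ => false  -- Python B raises ValueError; outside Pre_

def evaluate_depends_alt (attribute_ : String) (contains_set : List String) : Bool :=
  let tokens := pvTokenizeB attribute_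
  pvFinishB (tokens.foldl (pvBStep contains_set) (some ([], none, none)))

-- ===== PRECONDITION & SPEC =====
-- Pre-side copy of the tokenizer and the operator classifier (Pre_ is a condition on
-- the input's token shape only; it shares no definition with either port)
def pvSpecialCharP (c : Char) : Bool := c = '+' || c = ',' || c = '(' || c = ')'

def pvTokStepP (st : List String × String) (c : Char) : List String × String :=
  if pvSpecialCharP c then
    ((st.1 ++ (if st.2 = "" then [] else [st.2])) ++ [String.singleton c], "")
  else (st.1, st.2.push c)

def pvTokenizeP (s : String) : List String :=
  let st := s.toList.foldl pvTokStepP ([], "")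
  st.1 ++ (if st.2 = "" then [] else [st.2])

def pvIsOpP (t : String) : Bool := t = "+" || t = ","

-- token-shape DFA: e = "expecting an operand", d = open-paren depth
def pvDfa : Bool → Nat → List String → Bool
  | e, d, [] => !e && d == 0
  | e, d, t :: ts =>
    if pvIsOpP t then !e && pvDfa true d ts
    else if t = "(" then e && pvDfa true (d + 1) ts
    else if t = ")" then !e && decide (0 < d) && pvDfa false (d - 1) ts
    else e && pvDfa false d ts

-- Pre_ excludes malformed expressions (empty, dangling operators, unbalanced or empty
-- parentheses): there A raises, except for some leftover-'(' / empty-'()' inputs on which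
-- A's returned value is an accident of flushing '(' markers into the RPN; B raises on all
-- of them.
def Pre_evaluate_depends (attribute_ : String) (contains_set : List String) : Prop :=
  pvDfa true 0 (pvTokenizeP attribute_) = true

instance (attribute_ : String) (contains_set : List String) : Decidable (Pre_evaluate_depends attribute_ contains_set) := by unfold Pre_evaluate_depends; infer_instance

def pvWitness_evaluate_depends : String × List String := ("vk+(a,b)", ["vk", "b"])

def Spec_evaluate_depends (attribute_ : String) (contains_set : List String) (out : Bool) : Prop := out = evaluate_depends_alt attribute_ contains_set
instance (attribute_ : String) (contains_set : List String) (out : Bool) : Decidable (Spec_evaluate_depends attribute_ contains_set out) := by unfold Spec_evaluate_depends; infer_instance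

-- ===== CLAIM (what is proved, stated in full; the proofs are below) =====
def Claim_equal_evaluate_depends : Prop := ∀ (attribute_ : String) (contains_set : List String), Dom_evaluate_depends attribute_ contains_set → Pre_evaluate_depends attribute_ contains_set → Spec_evaluate_depends attribute_ contains_set (evaluate_depends attribute_ contains_set)

-- ===== LEMMAS AND PROOFS =====

-- the one-segment relation between A's (operator-stack segment, value-stack segment)
-- and B's (cur, pend) for the current parenthesis level
def pvSeg (o : List String) (s : List Bool) : Option Bool → Option String → Prop
  | some c, some op => pvIsOp op = true ∧ o = [op] ∧ s = [c]
  | some x, none =>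
      (o = [] ∧ s = [x]) ∨
      ∃ op v c, pvIsOp op = true ∧ o = [op] ∧ s = [v, c] ∧
        x = (if op = "+" then c && v else c || v)
  | none, none => o = [] ∧ s = []
  | none, some _ => False

def pvExpect (cur : Option Bool) (pend : Option String) : Bool := cur.isNone || pend.isSome

-- full coupling invariant between A's (ops, value stack) and B's (ctx, cur, pend)
def pvInv (ops : List String) (vals : List Bool) :
    List (Option Bool × Option String) → Option Bool → Option String → Prop
  | [], cur, pend => pvSeg ops vals cur pend
  | (c0, p0) :: rest, cur, pend =>
      ∃ o s ops' vals', ops = o ++ "(" :: ops' ∧ vals = s ++ vals' ∧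
        pvSeg o s cur pend ∧ pvExpect c0 p0 = true ∧ pvInv ops' vals' rest c0 p0


-- the three per-side copies are definitionally equal
theorem pvIsOpB_eq : pvIsOpB = pvIsOp := rfl
theorem pvIsOpP_eq : pvIsOpP = pvIsOp := rfl
theorem pvTokenizeB_eq : pvTokenizeB = pvTokenize := rfl
theorem pvTokenizeP_eq : pvTokenizeP = pvTokenize := rfl

theorem pvSeg_absorb {o : List String} {s : List Bool} {cur : Option Bool}
    {pend : Option String} (x : Bool) (he : pvExpect cur pend = true)
    (h : pvSeg o s cur pend) :
    pvSeg o (x :: s) (some (pvAbsorb cur pend x)) none := by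
  match cur, pend with
  | none, none =>
    obtain ⟨ho, hs⟩ := h; subst ho; subst hs; exact Or.inl ⟨rfl, rfl⟩
  | some c, some op =>
    obtain ⟨hop, ho, hs⟩ := h; subst ho; subst hs
    exact Or.inr ⟨op, x, c, hop, rfl, rfl, by simp [pvAbsorb]⟩
  | some c, none => simp [pvExpect] at he
  | none, some op => exact h.elim

theorem pvInv_absorb {ops : List String} {vals : List Bool}
    {ctx : List (Option Bool × Option String)} {cur : Option Bool}
    {pend : Option String} (x : Bool) (he : pvExpect cur pend = true)
    (h : pvInv ops vals ctx cur pend) :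
    pvInv ops (x :: vals) ctx (some (pvAbsorb cur pend x)) none := by
  cases ctx with
  | nil => exact pvSeg_absorb x he h
  | cons hd rest =>
    obtain ⟨c0, p0⟩ := hd
    obtain ⟨o, s, ops', vals', hops, hvals, hseg, hexp, hrest⟩ := h
    exact ⟨o, x :: s, ops', vals', hops, by simp [hvals], pvSeg_absorb x he hseg, hexp, hrest⟩

-- expecting-operand = false forces cur = some, pend = none
theorem pvExpect_false {cur : Option Bool} {pend : Option String}
    (h : pvExpect cur pend = false) : ∃ x, cur = some x ∧ pend = none := by
  match cur, pend with
  | some x, none => exact ⟨x, rfl, rfl⟩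
  | none, _ => simp [pvExpect] at h
  | some _, some _ => simp [pvExpect] at h

theorem pvEval_seg {S : List String} {o : List String} {s : List Bool} {x : Bool}
    (h : pvSeg o s (some x) none) (tail : List Bool) :
    o.foldl (pvEvalStep S) (s ++ tail) = x :: tail := by
  rcases h with ⟨ho, hs⟩ | ⟨op, v, c, hop, ho, hs, hx⟩
  · subst ho; subst hs; rfl
  · subst ho; subst hs; subst hx
    simp [List.foldl, pvEvalStep, hop]

theorem pvPopOps_seg {o : List String} {s : List Bool} {x : Bool} (r : List String)
    (h : pvSeg o s (some x) none) (hr : r = [] ∨ ∃ rs, r = "(" :: rs) :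
    pvPopOps (o ++ r) = (o, r) := by
  have hr' : pvPopOps r = ([], r) := by
    rcases hr with rfl | ⟨rs, rfl⟩
    · rfl
    · simp [pvPopOps, pvIsOp]
  rcases h with ⟨ho, _⟩ | ⟨op, v, c, hop, ho, _, _⟩
  · subst ho; simpa using hr'
  · subst ho; simp [pvPopOps, hop, hr']

theorem pvPopParen_seg {o : List String} {s : List Bool} {x : Bool} (r : List String)
    (h : pvSeg o s (some x) none) :
    pvPopParen (o ++ "(" :: r) = (o, r) := by
  rcases h with ⟨ho, _⟩ | ⟨op, v, c, hop, ho, _, _⟩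
  · subst ho; simp [pvPopParen]
  · subst ho
    have : (op = "(") = False := by
      rcases (by simpa [pvIsOp] using hop : op = "+" ∨ op = ",") with rfl | rfl <;> simp
    simp [pvPopParen, this]

theorem pvIsOp_isSpecial {t : String} (h : pvIsOp t = true) : pvIsSpecial t = true := by
  rcases (by simpa [pvIsOp] using h : t = "+" ∨ t = ",") with rfl | rfl <;> rfl

-- the main coupling induction: from any pair of related states, A's finished value
-- equals B's finished value on a token suffix the shape-DFA accepts
theorem pvMain (S : List String) : ∀ (ts ops rpn : List String)
    (ctx : List (Option Bool × Option String)) (cur : Option Bool) (pend : Option String),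
    pvInv ops (rpn.foldl (pvEvalStep S) []) ctx cur pend →
    pvDfa (pvExpect cur pend) ctx.length ts = true →
    pvFinishA (((ts.foldl pvShuntStep (ops, rpn)).2 ++ (ts.foldl pvShuntStep (ops, rpn)).1).foldl
        (pvEvalStep S) [])
    = pvFinishB (ts.foldl (pvBStep S) (some (ctx, cur, pend))) := by
  intro ts
  induction ts with
  | nil =>
    intro ops rpn ctx cur pend hinv hdfa
    simp [pvDfa] at hdfa
    obtain ⟨he, hd⟩ := hdfa
    obtain ⟨x, rfl, rfl⟩ := pvExpect_false (by simpa using he)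
    subst hd
    have := pvEval_seg (S := S) hinv []
    simp only [List.foldl_nil, List.foldl_append]
    simp at this
    simp [this, pvFinishA, pvFinishB]
  | cons t ts ih =>
    intro ops rpn ctx cur pend hinv hdfa
    by_cases hop : pvIsOp t = true
    · -- operator token
      rw [pvDfa] at hdfa
      simp [pvIsOpP_eq, hop] at hdfa
      obtain ⟨he, hdfa⟩ := hdfa
      obtain ⟨x, rfl, rfl⟩ := pvExpect_false (by simpa [pvExpect] using he)
      have hstep : pvShuntStep (ops, rpn) t
          = (t :: (pvPopOps ops).2, rpn ++ (pvPopOps ops).1) := by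
        simp [pvShuntStep, pvIsOp_isSpecial hop, hop]
      have hb : pvBStep S (some (ctx, some x, none)) t = some (ctx, some x, some t) := by
        simp [pvBStep, pvIsOpB_eq, hop]
      cases ctx with
      | nil =>
        have hpop : pvPopOps (ops ++ []) = (ops, []) := pvPopOps_seg [] hinv (Or.inl rfl)
        simp at hpop
        have hvals : (rpn ++ (pvPopOps ops).1).foldl (pvEvalStep S) [] = [x] := by
          rw [hpop, List.foldl_append]
          simpa using pvEval_seg (S := S) hinv []
        rw [List.foldl_cons, List.foldl_cons, hstep, hb]
        refine ih _ _ _ _ _ ?_ ?_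
        · rw [hvals, hpop]
          exact ⟨hop, rfl, rfl⟩
        · simpa [pvExpect] using hdfa
      | cons hd rest =>
        obtain ⟨c0, p0⟩ := hd
        obtain ⟨o, s, ops', vals', hops, hvals0, hseg, hexp, hrest⟩ := hinv
        have hpop : pvPopOps ops = (o, "(" :: ops') := by
          rw [hops]; exact pvPopOps_seg _ hseg (Or.inr ⟨ops', rfl⟩)
        have hvals : (rpn ++ (pvPopOps ops).1).foldl (pvEvalStep S) [] = x :: vals' := by
          rw [hpop, List.foldl_append, hvals0]
          exact pvEval_seg (S := S) hseg vals'
        rw [List.foldl_cons, List.foldl_cons, hstep, hb]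
        refine ih _ _ _ _ _ ?_ ?_
        · rw [hvals, hpop]
          exact ⟨[t], [x], ops', vals', rfl, rfl, ⟨hop, rfl, rfl⟩, hexp, hrest⟩
        · simpa [pvExpect] using hdfa
    · by_cases hlp : t = "("
      · -- open parenthesis
        subst hlp
        rw [pvDfa] at hdfa
        simp [pvIsOpP] at hdfa
        obtain ⟨he, hdfa⟩ := hdfa
        have hstep : pvShuntStep (ops, rpn) "(" = ("(" :: ops, rpn) := by
          simp [pvShuntStep, pvIsSpecial, pvIsOp]
        have hb : pvBStep S (some (ctx, cur, pend)) "("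
            = some ((cur, pend) :: ctx, none, none) := by
          have : (cur.isSome && pend.isNone) = false := by
            cases cur <;> cases pend <;> simp_all [pvExpect]
          simp [pvBStep, show pvIsOpB "(" = false from rfl, this]
        rw [List.foldl_cons, List.foldl_cons, hstep, hb]
        refine ih _ _ _ _ _ ?_ ?_
        · exact ⟨[], [], ops, rpn.foldl (pvEvalStep S) [], rfl, rfl, ⟨rfl, rfl⟩, he, hinv⟩
        · simpa [pvExpect] using hdfa
      · by_cases hrp : t = ")"
        · -- close parenthesis
          subst hrp
          rw [pvDfa] at hdfa
          simp [pvIsOpP] at hdfa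
          obtain ⟨⟨he, hd⟩, hdfa⟩ := hdfa
          obtain ⟨x, rfl, rfl⟩ := pvExpect_false (by simpa [pvExpect] using he)
          obtain ⟨⟨c0, p0⟩, rest, rfl⟩ :=
            List.exists_cons_of_ne_nil (l := ctx) (by rintro rfl; simp at hd)
          obtain ⟨o, s, ops', vals', hops, hvals0, hseg, hexp, hrest⟩ := hinv
          have hpop : pvPopParen ops = (o, ops') := by
            rw [hops]; exact pvPopParen_seg _ hseg
          have hstep : pvShuntStep (ops, rpn) ")"
              = ((pvPopParen ops).2, rpn ++ (pvPopParen ops).1) := by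
            simp [pvShuntStep, pvIsSpecial, pvIsOp]
          have hb : pvBStep S (some ((c0, p0) :: rest, some x, none)) ")"
              = some (rest, some (pvAbsorb c0 p0 x), none) := by
            simp [pvBStep, show pvIsOpB ")" = false from rfl]
          have hvals : (rpn ++ (pvPopParen ops).1).foldl (pvEvalStep S) [] = x :: vals' := by
            rw [hpop, List.foldl_append, hvals0]
            exact pvEval_seg (S := S) hseg vals'
          rw [List.foldl_cons, List.foldl_cons, hstep, hb]
          refine ih _ _ _ _ _ ?_ ?_
          · rw [hvals, hpop]
            exact pvInv_absorb x hexp hrest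
          · simpa [pvExpect] using hdfa
        · -- atom token
          have hsp : pvIsSpecial t = false := by
            simp only [pvIsSpecial]
            simp only [pvIsOp] at hop
            simp [hop, hlp, hrp]
          rw [pvDfa] at hdfa
          simp [pvIsOpP_eq, hop, hlp, hrp] at hdfa
          obtain ⟨he, hdfa⟩ := hdfa
          have hstep : pvShuntStep (ops, rpn) t = (ops, rpn ++ [t]) := by
            simp [pvShuntStep, hsp]
          have hb : pvBStep S (some (ctx, cur, pend)) t
              = some (ctx, some (pvAbsorb cur pend (decide (t ∈ S))), none) := by
            have hg : (cur.isSome && pend.isNone) = false := by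
              cases cur <;> cases pend <;> simp_all [pvExpect]
            simp [pvBStep, pvIsOpB_eq, hop, hlp, hrp, hg]
          have hvals : (rpn ++ [t]).foldl (pvEvalStep S) []
              = decide (t ∈ S) :: rpn.foldl (pvEvalStep S) [] := by
            rw [List.foldl_append]
            simp [List.foldl, pvEvalStep, hop]
          rw [List.foldl_cons, List.foldl_cons, hstep, hb]
          refine ih _ _ _ _ _ ?_ ?_
          · rw [hvals]
            exact pvInv_absorb _ he hinv
          · simpa [pvExpect] using hdfa

-- ===== VERDICT (by name: the statement is the Claim_ definition above) =====
theorem evaluate_depends_spec : Claim_equal_evaluate_depends := by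
  intro a S _hdom hpre
  have hpre' : pvDfa true 0 (pvTokenize a) = true := by
    rw [← pvTokenizeP_eq]; exact hpre
  unfold Spec_evaluate_depends evaluate_depends evaluate_depends_alt
  simp only [pvTokenizeB_eq]
  exact pvMain S (pvTokenize a) [] [] [] none none (⟨rfl, rfl⟩) hpre'
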